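-- pv_equiv track=rewrite | github.com/OneZoom/OZtree | OZprivate/ServerScripts/Utilities/make_js_treefiles.py | get_polytomy_substring_pos
-- ===== SOURCE A (Python) =====
-- def get_polytomy_substring_pos(start, end, start_end_arr, threshold, newick_str, called_by_self = False):
--     res = []
--     if (end <= start or (called_by_self and newick_str[end] == ')')):
--         res = res + [start, end]
--         if ((end - start) > threshold):
--             start_end_arr.append(start)
--             start_end_arr.append(end)
--         return res
--
--     cut_point = None
--     bracket_count = 0
--     for index in reversed(range(start, end+1)):
--         c = newick_str[index]
--         if c == ')' or c == '}':
--             bracket_count = bracket_count + 1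
--         elif c == '(' or c == '{':
--             bracket_count = bracket_count - 1
--             if (bracket_count == 1):
--                 cut_point = index - 1
--                 break
--     if (cut_point is not None):
--         res = res + get_polytomy_substring_pos(start+1, cut_point, start_end_arr, threshold, newick_str, True)
--         res = res + get_polytomy_substring_pos(cut_point+1, end-1, start_end_arr, threshold, newick_str, True)
--     else:
--         res = res + [start, start, end, end]
--     return res
-- ===== SOURCE B (Python) =====
-- # B: one preprocessing pass builds a depth-prefix array and, per nesting level, the
-- # ascending list of opening-bracket positions; each split then finds its cut point by
-- # a single binary search instead of A's per-call backward bracket-counting scan.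
-- # Like A, it appends the kept (start, end) pairs to start_end_arr in place.
-- import bisect
--
--
-- def _last_le(sorted_list, x):
--     """Largest element of sorted_list that is <= x, or None."""
--     j = bisect.bisect_right(sorted_list, x)
--     return sorted_list[j - 1] if j else None
--
--
-- def get_polytomy_substring_pos(start, end, start_end_arr, threshold, newick_str, called_by_self=False):
--     depth_after = [0]
--     openers_by_level = {}
--     d = 0
--     for k, c in enumerate(newick_str):
--         if c == '(' or c == '{':
--             d += 1
--             openers_by_level.setdefault(d, []).append(k)
--         elif c == ')' or c == '}':
--             d -= 1
--         depth_after.append(d)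
--     return _split(start, end, start_end_arr, threshold, newick_str, called_by_self,
--                   depth_after, openers_by_level)
--
--
-- def _split(start, end, start_end_arr, threshold, newick_str, called_by_self,
--            depth_after, openers_by_level):
--     if end <= start or (called_by_self and newick_str[end] == ')'):
--         if end - start > threshold:
--             start_end_arr.append(start)
--             start_end_arr.append(end)
--         return [start, end]
--     lst = openers_by_level.get(depth_after[end + 1] + 2, [])
--     v = _last_le(lst, end)
--     if v is not None and v >= start:
--         cut = v - 1
--         return (_split(start + 1, cut, start_end_arr, threshold, newick_str, True,
--                        depth_after, openers_by_level)
--                 + _split(cut + 1, end - 1, start_end_arr, threshold, newick_str, True,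
--                          depth_after, openers_by_level))
--     return [start, start, end, end]
-- ===== Notes on version B (the rewrite author's own statement) =====
-- stated objective: alternative
-- what changed: A rescans the substring backwards counting brackets on every recursive split; B instead does one preprocessing pass building a depth-prefix array plus per-depth ascending lists of opener positions, and each split finds its cut point with a single binary search (a timing run's input family did not show a speed-up, so none is claimed).
-- outside the precondition, e.g. on get_polytomy_substring_pos(-7, -3, [], 10, ')()})}', False): A returns [-6, -6, -5, -4], B returns [-7, -7, -3, -3]
import Mathlib
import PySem

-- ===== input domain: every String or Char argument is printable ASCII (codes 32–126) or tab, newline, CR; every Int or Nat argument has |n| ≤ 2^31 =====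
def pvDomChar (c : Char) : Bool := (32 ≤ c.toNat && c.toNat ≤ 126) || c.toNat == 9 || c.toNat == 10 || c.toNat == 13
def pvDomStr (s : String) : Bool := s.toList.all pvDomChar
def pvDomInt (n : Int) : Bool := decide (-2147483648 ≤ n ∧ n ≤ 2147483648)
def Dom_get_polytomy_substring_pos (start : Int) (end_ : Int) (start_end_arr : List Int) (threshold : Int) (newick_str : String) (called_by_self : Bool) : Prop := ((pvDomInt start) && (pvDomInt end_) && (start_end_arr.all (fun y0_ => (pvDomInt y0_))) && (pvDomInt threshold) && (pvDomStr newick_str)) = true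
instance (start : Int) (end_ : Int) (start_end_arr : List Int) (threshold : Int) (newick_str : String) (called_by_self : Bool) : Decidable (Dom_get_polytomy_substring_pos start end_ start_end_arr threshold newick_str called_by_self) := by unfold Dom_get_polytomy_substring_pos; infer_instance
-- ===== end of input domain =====

-- B replaces A's per-split backward bracket-counting scan by one preprocessing pass
-- (depth-prefix array + per-depth ascending opener positions) and a binary search per split.
-- Both Pythons also append kept (start, end) pairs to start_end_arr in place, in the same
-- order; the equivalence proved here is about the RETURN value only.

-- ===== PORT A =====
-- A's backward scan: `for index in reversed(range(start, end+1)): ...` with `break`.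
-- The Nat argument is loop fuel = number of remaining indices (a totality guard only);
-- callers pass enough for the whole range.
def pvFindCut (newick_str : String) (start : Int) : Nat → Int → Int → Option Int
  | 0, _, _ => none
  | fuel + 1, index, bc =>
    if index < start then none
    else if (PySem.Str.pyGet? newick_str index).getD ' ' = ')'
        ∨ (PySem.Str.pyGet? newick_str index).getD ' ' = '}' then
      pvFindCut newick_str start fuel (index - 1) (bc + 1)
    else if (PySem.Str.pyGet? newick_str index).getD ' ' = '('
        ∨ (PySem.Str.pyGet? newick_str index).getD ' ' = '{' then
      (if bc - 1 = 1 then some (index - 1)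
       else pvFindCut newick_str start fuel (index - 1) (bc - 1))
    else pvFindCut newick_str start fuel (index - 1) bc

-- A's recursion; the Nat argument is recursion fuel (the range shrinks by ≥ 1 per level)
def pvARec (newick_str : String) (start_end_arr : List Int) (threshold : Int) :
    Nat → Int → Int → Bool → List Int
  | 0, _, _, _ => []
  | fuel + 1, start, end_, called_by_self =>
    if end_ ≤ start ∨ (called_by_self = true ∧ (PySem.Str.pyGet? newick_str end_).getD ' ' = ')') then
      [start, end_]
    else
      match pvFindCut newick_str start ((end_ - start + 1).toNat) end_ 0 with
      | some cut =>
          pvARec newick_str start_end_arr threshold fuel (start + 1) cut true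
            ++ pvARec newick_str start_end_arr threshold fuel (cut + 1) (end_ - 1) true
      | none => [start, start, end_, end_]

def get_polytomy_substring_pos (start : Int) (end_ : Int) (start_end_arr : List Int) (threshold : Int) (newick_str : String) (called_by_self : Bool) : List Int :=
  pvARec newick_str start_end_arr threshold ((end_ - start).toNat + 1) start end_ called_by_self

-- ===== PORT B =====
-- one step of Source B's preprocessing loop over enumerate(newick_str);
-- state = (depth_after, openers_by_level, d)
def pvBuildStep (st : List Int × PySem.Dict Int (List Int) × Int) (kc : Int × Char) :
    List Int × PySem.Dict Int (List Int) × Int :=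
  if kc.2 = '(' ∨ kc.2 = '{' then
    (st.1 ++ [st.2.2 + 1],
     st.2.1.insert (st.2.2 + 1) (st.2.1.getD (st.2.2 + 1) [] ++ [kc.1]),
     st.2.2 + 1)
  else if kc.2 = ')' ∨ kc.2 = '}' then (st.1 ++ [st.2.2 - 1], st.2.1, st.2.2 - 1)
  else (st.1 ++ [st.2.2], st.2.1, st.2.2)

def pvBuild (newick_str : String) : List Int × PySem.Dict Int (List Int) × Int :=
  (PySem.List.enumerate newick_str.toList).foldl pvBuildStep ([0], PySem.Dict.empty, 0)

-- Source B's _last_le: bisect.bisect_right, then sorted_list[j-1] if j else None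
def pvLastLE (lst : List Int) (x : Int) : Option Int :=
  let j := PySem.List.bisectRight lst x
  if j = 0 then none else lst[j - 1]?

-- Source B's _split; the Nat argument is recursion fuel (a totality guard only)
def pvSplitRec (depth_after : List Int) (ob : PySem.Dict Int (List Int)) (newick_str : String)
    (threshold : Int) : Nat → Int → Int → Bool → List Int
  | 0, _, _, _ => []
  | fuel + 1, start, end_, called_by_self =>
    if end_ ≤ start ∨ (called_by_self = true ∧ (PySem.Str.pyGet? newick_str end_).getD ' ' = ')') then
      [start, end_]
    else
      match pvLastLE (ob.getD ((PySem.List.pyGet? depth_after (end_ + 1)).getD 0 + 2) []) end_ with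
      | some v =>
          if start ≤ v then
            pvSplitRec depth_after ob newick_str threshold fuel (start + 1) (v - 1) true
              ++ pvSplitRec depth_after ob newick_str threshold fuel v (end_ - 1) true
          else [start, start, end_, end_]
      | none => [start, start, end_, end_]

def get_polytomy_substring_pos_alt (start : Int) (end_ : Int) (start_end_arr : List Int) (threshold : Int) (newick_str : String) (called_by_self : Bool) : List Int :=
  let b := pvBuild newick_str
  pvSplitRec b.1 b.2.1 newick_str threshold ((end_ - start).toNat + 1) start end_ called_by_self

-- ===== PRECONDITION & SPEC =====
-- Pre_ excludes calls whose scanned range [start, end] is not fully inside the string: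
-- there A either raises IndexError or returns a value produced by Python's accidental
-- negative-index wraparound, which B (working with genuine string offsets) does not mimic.
def Pre_get_polytomy_substring_pos (start : Int) (end_ : Int) (start_end_arr : List Int) (threshold : Int) (newick_str : String) (called_by_self : Bool) : Prop :=
  end_ ≤ start ∨ (0 ≤ start ∧ end_ < (newick_str.toList.length : Int))
instance (start : Int) (end_ : Int) (start_end_arr : List Int) (threshold : Int) (newick_str : String) (called_by_self : Bool) : Decidable (Pre_get_polytomy_substring_pos start end_ start_end_arr threshold newick_str called_by_self) := by unfold Pre_get_polytomy_substring_pos; infer_instance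

def pvWitness_get_polytomy_substring_pos : Int × Int × List Int × Int × String × Bool :=
  (0, 7, [], 3, "((a)(b))", false)

def Spec_get_polytomy_substring_pos (start : Int) (end_ : Int) (start_end_arr : List Int) (threshold : Int) (newick_str : String) (called_by_self : Bool) (out : List Int) : Prop := out = get_polytomy_substring_pos_alt start end_ start_end_arr threshold newick_str called_by_self
instance (start : Int) (end_ : Int) (start_end_arr : List Int) (threshold : Int) (newick_str : String) (called_by_self : Bool) (out : List Int) : Decidable (Spec_get_polytomy_substring_pos start end_ start_end_arr threshold newick_str called_by_self out) := by unfold Spec_get_polytomy_substring_pos; infer_instance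

-- ===== CLAIM (what is proved, stated in full; the proofs are below) =====
def Claim_equal_get_polytomy_substring_pos : Prop := ∀ (start : Int) (end_ : Int) (start_end_arr : List Int) (threshold : Int) (newick_str : String) (called_by_self : Bool), Dom_get_polytomy_substring_pos start end_ start_end_arr threshold newick_str called_by_self → Pre_get_polytomy_substring_pos start end_ start_end_arr threshold newick_str called_by_self → Spec_get_polytomy_substring_pos start end_ start_end_arr threshold newick_str called_by_self (get_polytomy_substring_pos start end_ start_end_arr threshold newick_str called_by_self)

-- ===== LEMMAS AND PROOFS =====

theorem pvWitness_ok :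
    Dom_get_polytomy_substring_pos (pvWitness_get_polytomy_substring_pos.1) (pvWitness_get_polytomy_substring_pos.2.1) (pvWitness_get_polytomy_substring_pos.2.2.1) (pvWitness_get_polytomy_substring_pos.2.2.2.1) (pvWitness_get_polytomy_substring_pos.2.2.2.2.1) (pvWitness_get_polytomy_substring_pos.2.2.2.2.2) ∧
    Pre_get_polytomy_substring_pos (pvWitness_get_polytomy_substring_pos.1) (pvWitness_get_polytomy_substring_pos.2.1) (pvWitness_get_polytomy_substring_pos.2.2.1) (pvWitness_get_polytomy_substring_pos.2.2.2.1) (pvWitness_get_polytomy_substring_pos.2.2.2.2.1) (pvWitness_get_polytomy_substring_pos.2.2.2.2.2) := by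
  constructor <;> decide

-- proof-side abstractions: prefix depth, the qualifying-opener predicate, and the
-- per-level opener list that pvBuild's dictionary holds
def pvDelta (c : Char) : Int :=
  if c = '(' ∨ c = '{' then 1 else if c = ')' ∨ c = '}' then -1 else 0

def pvDA (cs : List Char) : Int := cs.foldl (fun d c => d + pvDelta c) 0

def pvQual (cs : List Char) (k : Nat) (t : Int) : Bool :=
  (decide ((cs.getD k ' ') = '(' ∨ (cs.getD k ' ') = '{')) && (pvDA (cs.take (k + 1)) == t)

def pvL (cs : List Char) (t : Int) : List Int :=
  ((List.range cs.length).filter (fun k => pvQual cs k t)).map (fun k => Int.ofNat k)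

def pvLook (L : List Int) (s0 i : Int) : Option Int :=
  match pvLastLE L i with
  | some v => if s0 ≤ v then some (v - 1) else none
  | none => none

theorem pvDA_append (cs : List Char) (c : Char) : pvDA (cs ++ [c]) = pvDA cs + pvDelta c := by
  simp [pvDA, List.foldl_append]

theorem pvDA_take_succ (cs : List Char) (k : Nat) (hk : k < cs.length) :
    pvDA (cs.take (k + 1)) = pvDA (cs.take k) + pvDelta cs[k] := by
  have h1 : cs.take (k + 1) = cs.take k ++ [cs[k]] := by
    rw [List.take_add_one, List.getElem?_eq_getElem hk]
    simp
  rw [h1, pvDA_append]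

theorem pvL_sorted (cs : List Char) (t : Int) : (pvL cs t).Pairwise (· < ·) := by
  unfold pvL
  rw [List.pairwise_map]
  refine List.Pairwise.imp ?_ ((List.pairwise_lt_range).filter _)
  intro a b h
  exact Int.ofNat_lt.mpr h

theorem pvL_mem (cs : List Char) (t : Int) (v : Int) :
    v ∈ pvL cs t ↔ ∃ k : Nat, k < cs.length ∧ pvQual cs k t = true ∧ v = (k : Int) := by
  unfold pvL
  simp only [List.mem_map, List.mem_filter, List.mem_range]
  constructor
  · rintro ⟨k, ⟨hk, hq⟩, rfl⟩; exact ⟨k, hk, hq, rfl⟩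
  · rintro ⟨k, hk, hq, rfl⟩; exact ⟨k, ⟨hk, hq⟩, rfl⟩

theorem pvBisectLoop_inv (xs : List Int) (x : Int) :
    ∀ (fuel lo hi : Nat),
      (lo ≠ 0 → ∃ y, xs[lo - 1]? = some y ∧ ¬ x < y) →
      PySem.List.bisectRightLoop xs x fuel lo hi ≠ 0 →
      ∃ y, xs[PySem.List.bisectRightLoop xs x fuel lo hi - 1]? = some y ∧ ¬ x < y := by
  intro fuel
  induction fuel with
  | zero =>
    intro lo hi hinv hne
    simp only [PySem.List.bisectRightLoop] at hne ⊢
    exact hinv hne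
  | succ fuel ih =>
    intro lo hi hinv hne
    simp only [PySem.List.bisectRightLoop] at hne ⊢
    by_cases hlh : lo < hi
    · simp only [hlh, if_true] at hne ⊢
      cases hmid : xs[(lo + hi) / 2]? with
      | none => simp only [hmid] at hne ⊢; exact hinv hne
      | some y =>
        simp only [hmid] at hne ⊢
        by_cases hxy : x < y
        · simp only [hxy, if_true] at hne ⊢; exact ih lo ((lo + hi) / 2) hinv hne
        · simp only [hxy, if_false] at hne ⊢
          refine ih ((lo + hi) / 2 + 1) hi ?_ hne
          intro _
          exact ⟨y, by simpa using hmid, hxy⟩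
    · simp only [hlh, if_false] at hne ⊢
      exact hinv hne

theorem pvLastLE_le (lst : List Int) (x v : Int) : pvLastLE lst x = some v → v ≤ x := by
  intro h
  unfold pvLastLE at h
  by_cases h0 : PySem.List.bisectRight lst x = 0
  · simp [h0] at h
  · simp only [h0, if_false] at h
    have := pvBisectLoop_inv lst x lst.length 0 lst.length (by simp) (by
      simpa [PySem.List.bisectRight] using h0)
    obtain ⟨y, hy, hxy⟩ := this
    rw [show PySem.List.bisectRightLoop lst x lst.length 0 lst.length
          = PySem.List.bisectRight lst x from rfl] at hy
    rw [h] at hy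
    cases hy
    omega

theorem pvLastLE_none_iff (lst : List Int) (hs : lst.Pairwise (· < ·)) (x : Int) :
    pvLastLE lst x = none ↔ ∀ w ∈ lst, x < w := by
  obtain ⟨hle, hlo, hhi⟩ :=
    PySem.List.bisectRight_spec lst x (hs.imp (fun h => le_of_lt h))
  unfold pvLastLE
  constructor
  · intro h w hw
    by_cases h0 : PySem.List.bisectRight lst x = 0
    · obtain ⟨k, hk, rfl⟩ := List.mem_iff_getElem.mp hw
      exact hhi k hk (by omega)
    · simp only [h0, if_false] at h
      rw [List.getElem?_eq_none_iff] at h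
      omega
  · intro hall
    by_cases h0 : PySem.List.bisectRight lst x = 0
    · simp [h0]
    · exfalso
      have h1 := hlo (PySem.List.bisectRight lst x - 1) (by omega) (by omega)
      exact absurd h1 (not_le.mpr (hall _ (List.getElem_mem _)))

theorem pvLastLE_some_iff (lst : List Int) (hs : lst.Pairwise (· < ·)) (x v : Int) :
    pvLastLE lst x = some v ↔ v ∈ lst ∧ v ≤ x ∧ ∀ w ∈ lst, w ≤ x → w ≤ v := by
  obtain ⟨hle, hlo, hhi⟩ :=
    PySem.List.bisectRight_spec lst x (hs.imp (fun h => le_of_lt h))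
  have hmono := List.pairwise_iff_getElem.mp hs
  constructor
  · intro h
    have hvx := pvLastLE_le lst x v h
    unfold pvLastLE at h
    by_cases h0 : PySem.List.bisectRight lst x = 0
    · simp [h0] at h
    · simp only [h0, if_false] at h
      obtain ⟨hj1, hv⟩ := List.getElem?_eq_some_iff.mp h
      refine ⟨hv ▸ List.getElem_mem _, hvx, ?_⟩
      intro w hw hwx
      obtain ⟨k, hk, rfl⟩ := List.mem_iff_getElem.mp hw
      by_cases hkj : k < PySem.List.bisectRight lst x
      · rcases Nat.lt_or_ge k (PySem.List.bisectRight lst x - 1) with hlt | hge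
        · have := hmono k (PySem.List.bisectRight lst x - 1) hk hj1 hlt
          omega
        · have : k = PySem.List.bisectRight lst x - 1 := by omega
          subst this; omega
      · have := hhi k hk (by omega); omega
  · rintro ⟨hv, hvx, hmax⟩
    obtain ⟨k, hk, hkv⟩ := List.mem_iff_getElem.mp hv
    have h0 : PySem.List.bisectRight lst x ≠ 0 := by
      intro h0
      have := hhi k hk (by omega)
      omega
    unfold pvLastLE
    simp only [h0, if_false]
    have hj1 : PySem.List.bisectRight lst x - 1 < lst.length := by omega
    rw [List.getElem?_eq_some_iff]
    refine ⟨hj1, ?_⟩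
    have h1 : lst[PySem.List.bisectRight lst x - 1] ≤ x := hlo _ hj1 (by omega)
    have h2 : lst[PySem.List.bisectRight lst x - 1] ≤ v := hmax _ (List.getElem_mem _) h1
    have h3 : v ≤ lst[PySem.List.bisectRight lst x - 1] := by
      by_cases hkj : k < PySem.List.bisectRight lst x
      · rcases Nat.lt_or_ge k (PySem.List.bisectRight lst x - 1) with hlt | hge
        · have := hmono k (PySem.List.bisectRight lst x - 1) hk hj1 hlt; omega
        · have : k = PySem.List.bisectRight lst x - 1 := by omega
          subst this; omega
      · have := hhi k hk (by omega); omega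
    omega

theorem pvLook_step (L : List Int) (hs : L.Pairwise (· < ·)) (s0 i : Int) (h : i ∉ L) :
    pvLook L s0 i = pvLook L s0 (i - 1) := by
  unfold pvLook
  have key : pvLastLE L i = pvLastLE L (i - 1) := by
    cases hcase : pvLastLE L (i - 1) with
    | none =>
      rw [pvLastLE_none_iff L hs] at hcase
      rw [pvLastLE_none_iff L hs]
      intro w hw
      have h1 := hcase w hw
      have h2 : w ≠ i := fun e => h (e ▸ hw)
      omega
    | some v =>
      rw [pvLastLE_some_iff L hs] at hcase
      rw [pvLastLE_some_iff L hs]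
      obtain ⟨hm, hvle, hmax⟩ := hcase
      refine ⟨hm, by omega, ?_⟩
      intro w hw hwi
      have h2 : w ≠ i := fun e => h (e ▸ hw)
      exact hmax w hw (by omega)
  rw [key]

theorem pvQual_append (cs : List Char) (c : Char) (k : Nat) (hk : k < cs.length) (t : Int) :
    pvQual (cs ++ [c]) k t = pvQual cs k t := by
  unfold pvQual
  rw [List.getD_append _ _ _ _ hk, List.take_append_of_le_length (by omega)]

theorem pvBuild_spec (cs : List Char) :
    ((PySem.List.enumerate cs).foldl pvBuildStep ([0], PySem.Dict.empty, 0)).1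
        = (List.range (cs.length + 1)).map (fun k => pvDA (cs.take k))
      ∧ ((PySem.List.enumerate cs).foldl pvBuildStep ([0], PySem.Dict.empty, 0)).2.2 = pvDA cs
      ∧ ∀ t : Int, ((PySem.List.enumerate cs).foldl pvBuildStep ([0], PySem.Dict.empty, 0)).2.1.getD t []
          = pvL cs t := by
  induction cs using List.reverseRecOn with
  | nil =>
    refine ⟨by simp [PySem.List.enumerate_nil, pvDA], by simp [PySem.List.enumerate_nil, pvDA], ?_⟩
    intro t
    simp [PySem.List.enumerate_nil, pvL, PySem.Dict.getD_empty]
  | append_singleton cs c ih =>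
    obtain ⟨ih1, ih2, ih3⟩ := ih
    have hstep : (PySem.List.enumerate (cs ++ [c])).foldl pvBuildStep ([0], PySem.Dict.empty, 0)
        = pvBuildStep ((PySem.List.enumerate cs).foldl pvBuildStep ([0], PySem.Dict.empty, 0))
            ((cs.length : Int), c) := by
      rw [PySem.List.enumerate_append, List.foldl_append]
      simp [PySem.List.enumerate_cons, PySem.List.enumerate_nil]
    rw [hstep]
    set prev := (PySem.List.enumerate cs).foldl pvBuildStep ([0], PySem.Dict.empty, 0) with hprev
    have hmapstable :
        (List.range (cs.length + 1)).map (fun k => pvDA ((cs ++ [c]).take k))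
          = (List.range (cs.length + 1)).map (fun k => pvDA (cs.take k)) := by
      apply List.map_congr_left
      intro k hk
      rw [List.mem_range] at hk
      rw [List.take_append_of_le_length (by omega)]
    have htakeall : (cs ++ [c]).take (cs.length + 1) = cs ++ [c] := by
      apply List.take_of_length_le
      simp
    have hda : ∀ dnew : Int,
        dnew = pvDA (cs ++ [c]) →
        prev.1 ++ [dnew]
          = (List.range ((cs ++ [c]).length + 1)).map (fun k => pvDA ((cs ++ [c]).take k)) := by
      intro dnew hdnew
      rw [List.length_append, List.length_singleton, List.range_succ, List.map_append,
        hmapstable, ← ih1]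
      simp [htakeall, hdnew]
    have hLtail : ∀ t : Int, pvL (cs ++ [c]) t
        = pvL cs t ++ (if pvQual (cs ++ [c]) cs.length t then [(cs.length : Int)] else []) := by
      intro t
      unfold pvL
      rw [List.length_append, List.length_singleton, List.range_succ, List.filter_append,
        List.map_append]
      congr 1
      · congr 1
        apply List.filter_congr
        intro k hk
        rw [List.mem_range] at hk
        exact pvQual_append cs c k hk t
      · by_cases hq : pvQual (cs ++ [c]) cs.length t <;> simp [hq, Int.ofNat_eq_natCast]
    have hgetD : (cs ++ [c]).getD cs.length ' ' = c := by
      rw [List.getD_eq_getElem _ _ (by simp), List.getElem_append_right (le_refl cs.length)]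
      simp
    have hqual_last : ∀ t : Int,
        pvQual (cs ++ [c]) cs.length t
          = ((decide (c = '(' ∨ c = '{')) && (pvDA (cs ++ [c]) == t)) := by
      intro t
      unfold pvQual
      rw [hgetD, htakeall]
    by_cases hop : c = '(' ∨ c = '{'
    · -- opener step
      have hdelta : pvDelta c = 1 := by simp [pvDelta, hop]
      have hdnew : pvDA (cs ++ [c]) = pvDA cs + 1 := by rw [pvDA_append, hdelta]
      simp only [pvBuildStep, hop, if_true]
      refine ⟨?_, ?_, ?_⟩
      · exact hda _ (by rw [ih2, hdnew])
      · rw [ih2, hdnew]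
      · intro t
        rw [PySem.Dict.getD_insert, hLtail t, hqual_last t, ih2, ih3, ih3, hdnew]
        by_cases ht : t = pvDA cs + 1
        · simp [ht, hop]
        · have hne : (pvDA cs + 1 == t) = false := by simp; omega
          simp [ht, hne]
    · by_cases hcl : c = ')' ∨ c = '}'
      · have hdelta : pvDelta c = -1 := by
          rcases hcl with h | h <;> rw [h] <;> decide
        have hdnew : pvDA (cs ++ [c]) = pvDA cs - 1 := by
          rw [pvDA_append, hdelta]; ring
        simp only [pvBuildStep, hop, hcl, if_true, if_false]
        refine ⟨?_, ?_, ?_⟩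
        · exact hda _ (by rw [ih2, hdnew])
        · rw [ih2, hdnew]
        · intro t
          rw [hLtail t, hqual_last t, ih3]
          simp [hop]
      · have hdelta : pvDelta c = 0 := by simp [pvDelta, hop, hcl]
        have hdnew : pvDA (cs ++ [c]) = pvDA cs := by
          rw [pvDA_append, hdelta]; ring
        simp only [pvBuildStep, hop, hcl, if_false]
        refine ⟨?_, ?_, ?_⟩
        · exact hda _ (by rw [ih2, hdnew])
        · rw [ih2, hdnew]
        · intro t
          rw [hLtail t, hqual_last t, ih3]
          simp [hop]

theorem pvLook_none_of_lt (L : List Int) (s0 i : Int) (h : i < s0) :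
    pvLook L s0 i = none := by
  unfold pvLook
  cases hcase : pvLastLE L i with
  | none => rfl
  | some v =>
    have := pvLastLE_le L i v hcase
    have hnot : ¬ s0 ≤ v := by omega
    simp [hnot]

theorem pvBridge (s : String) (s0 : Int) (hs0 : 0 ≤ s0) :
    ∀ (n : Nat) (i bc : Int), (i - s0 + 1).toNat ≤ n → i < (s.toList.length : Int) →
      pvFindCut s s0 n i bc
        = pvLook (pvL s.toList (pvDA (s.toList.take (i + 1).toNat) + 2 - bc)) s0 i := by
  intro n
  induction n with
  | zero =>
    intro i bc hn _
    have his : i < s0 := by omega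
    rw [pvFindCut]
    exact (pvLook_none_of_lt _ _ _ his).symm
  | succ n ih =>
    intro i bc hn hlen
    by_cases his : i < s0
    · rw [pvFindCut]
      simp only [his, if_true]
      exact (pvLook_none_of_lt _ _ _ his).symm
    · have hi0 : 0 ≤ i := le_trans hs0 (not_lt.mp his)
      have hitlt : i.toNat < s.toList.length := by omega
      have higet : PySem.Str.pyGet? s i = some (s.toList[i.toNat]) := by
        have h := PySem.Str.pyGet?_natCast s i.toNat
        rw [Int.toNat_of_nonneg hi0] at h
        rw [h, List.getElem?_eq_getElem hitlt]
      have htn1 : (i + 1).toNat = i.toNat + 1 := by omega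
      have htn0 : (i - 1 + 1).toNat = i.toNat := by omega
      have hmemiff : ∀ t : Int, (i ∈ pvL s.toList t) ↔ pvQual s.toList i.toNat t = true := by
        intro t
        rw [pvL_mem]
        constructor
        · rintro ⟨k, hk, hq, hik⟩
          have : k = i.toNat := by omega
          subst this; exact hq
        · intro hq; exact ⟨i.toNat, hitlt, hq, by omega⟩
      have hgetD : s.toList.getD i.toNat ' ' = s.toList[i.toNat] :=
        List.getD_eq_getElem _ _ hitlt
      rw [pvFindCut]
      simp only [his, if_false, higet, Option.getD_some]
      by_cases hcl : s.toList[i.toNat] = ')' ∨ s.toList[i.toNat] = '}'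
      · -- closer: does not qualify, bc+1 keeps the target level
        simp only [hcl, if_true]
        have hdelta : pvDelta s.toList[i.toNat] = -1 := by
          rcases hcl with h | h <;> rw [h] <;> decide
        have hnotmem : i ∉ pvL s.toList (pvDA (s.toList.take (i + 1).toNat) + 2 - bc) := by
          rw [hmemiff]
          unfold pvQual
          rw [hgetD]
          rcases hcl with h | h <;> simp [h]
        rw [ih (i - 1) (bc + 1) (by omega) (by omega), htn0]
        have hteq : pvDA (s.toList.take i.toNat) + 2 - (bc + 1)
            = pvDA (s.toList.take (i + 1).toNat) + 2 - bc := by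
          rw [htn1, pvDA_take_succ _ _ hitlt, hdelta]; ring
        rw [hteq]
        exact (pvLook_step _ (pvL_sorted _ _) _ _ hnotmem).symm
      · by_cases hop : s.toList[i.toNat] = '(' ∨ s.toList[i.toNat] = '{'
        · simp only [hcl, hop, if_true, if_false]
          have hdelta : pvDelta s.toList[i.toNat] = 1 := by simp [pvDelta, hop]
          by_cases hbc : bc - 1 = 1
          · -- the cut is found at i
            simp only [hbc, if_true]
            have hmem : i ∈ pvL s.toList (pvDA (s.toList.take (i + 1).toNat) + 2 - bc) := by
              rw [hmemiff]
              unfold pvQual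
              rw [hgetD, htn1]
              rcases hop with h | h <;> simp [h] <;> omega
            have hsome : pvLastLE (pvL s.toList (pvDA (s.toList.take (i + 1).toNat) + 2 - bc)) i
                = some i := by
              rw [pvLastLE_some_iff _ (pvL_sorted _ _)]
              exact ⟨hmem, le_refl i, fun w _ hw => hw⟩
            unfold pvLook
            rw [hsome]
            have hsi : s0 ≤ i := not_lt.mp his
            simp [hsi]
          · simp only [hbc, if_false]
            have hnotmem : i ∉ pvL s.toList (pvDA (s.toList.take (i + 1).toNat) + 2 - bc) := by
              rw [hmemiff]
              unfold pvQual
              rw [hgetD, htn1]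
              rcases hop with h | h <;> simp [h] <;> omega
            rw [ih (i - 1) (bc - 1) (by omega) (by omega), htn0]
            have hteq : pvDA (s.toList.take i.toNat) + 2 - (bc - 1)
                = pvDA (s.toList.take (i + 1).toNat) + 2 - bc := by
              rw [htn1, pvDA_take_succ _ _ hitlt, hdelta]; ring
            rw [hteq]
            exact (pvLook_step _ (pvL_sorted _ _) _ _ hnotmem).symm
        · simp only [hcl, hop, if_false]
          have hdelta : pvDelta s.toList[i.toNat] = 0 := by simp [pvDelta, hop, hcl]
          have hnotmem : i ∉ pvL s.toList (pvDA (s.toList.take (i + 1).toNat) + 2 - bc) := by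
            rw [hmemiff]
            unfold pvQual
            rw [hgetD]
            simp [hop]
          rw [ih (i - 1) bc (by omega) (by omega), htn0]
          have hteq : pvDA (s.toList.take i.toNat) + 2 - bc
              = pvDA (s.toList.take (i + 1).toNat) + 2 - bc := by
            rw [htn1, pvDA_take_succ _ _ hitlt, hdelta]; ring
          rw [hteq]
          exact (pvLook_step _ (pvL_sorted _ _) _ _ hnotmem).symm

theorem pvMain (s : String) (arr : List Int) (thr : Int) :
    ∀ (fa fb : Nat) (s0 e0 : Int) (cbs : Bool), (e0 - s0).toNat < fa → (e0 - s0).toNat < fb →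
      (s0 < e0 → 0 ≤ s0 ∧ e0 < (s.toList.length : Int)) →
      pvARec s arr thr fa s0 e0 cbs
        = pvSplitRec (pvBuild s).1 (pvBuild s).2.1 s thr fb s0 e0 cbs := by
  intro fa
  induction fa with
  | zero => intro fb s0 e0 cbs h; omega
  | succ fa ih =>
    intro fb s0 e0 cbs hfa hfb hok
    cases fb with
    | zero => omega
    | succ fb =>
    rw [pvARec, pvSplitRec]
    by_cases hbase : e0 ≤ s0 ∨ (cbs = true ∧ (PySem.Str.pyGet? s e0).getD ' ' = ')')
    · simp only [hbase, if_true]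
    · simp only [hbase, if_false]
      have hlt : s0 < e0 := by
        by_contra h
        exact hbase (Or.inl (by omega))
      obtain ⟨hs0, hlen⟩ := hok hlt
      obtain ⟨hb1, _, hb3⟩ := pvBuild_spec s.toList
      have hb1' : (pvBuild s).1
          = (List.range (s.toList.length + 1)).map (fun k => pvDA (s.toList.take k)) := hb1
      have hb3' : ∀ t : Int, (pvBuild s).2.1.getD t [] = pvL s.toList t := hb3
      have hdepth : (PySem.List.pyGet? (pvBuild s).1 (e0 + 1)).getD 0
          = pvDA (s.toList.take (e0 + 1).toNat) := by
        rw [hb1']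
        have h := PySem.List.pyGet?_natCast
          ((List.range (s.toList.length + 1)).map (fun k => pvDA (s.toList.take k))) (e0 + 1).toNat
        rw [Int.toNat_of_nonneg (by omega : (0 : Int) ≤ e0 + 1)] at h
        rw [h, List.getElem?_map, List.getElem?_range (by omega)]
        simp
      have hlst : (pvBuild s).2.1.getD ((PySem.List.pyGet? (pvBuild s).1 (e0 + 1)).getD 0 + 2) []
          = pvL s.toList (pvDA (s.toList.take (e0 + 1).toNat) + 2) := by
        rw [hdepth, hb3']
      have hcut := pvBridge s s0 hs0 ((e0 - s0 + 1).toNat) e0 0 (by omega) hlen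
      rw [show pvDA (s.toList.take (e0 + 1).toNat) + 2 - 0
          = pvDA (s.toList.take (e0 + 1).toNat) + 2 by ring] at hcut
      split
      · rename_i cut hcutA
        split
        · rename_i v' hB
          rw [hlst] at hB
          have hvle : v' ≤ e0 := pvLastLE_le _ _ _ hB
          have hAB : pvFindCut s s0 ((e0 - s0 + 1).toNat) e0 0 = (if s0 ≤ v' then some (v' - 1) else none) := by
            rw [hcut]; unfold pvLook; rw [hB]
          rw [hcutA] at hAB
          by_cases hv : s0 ≤ v'
          · rw [if_pos hv] at hAB
            injection hAB with hq
            subst hq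
            rw [if_pos hv]
            rw [show v' - 1 + 1 = v' from by ring]
            rw [ih fb (s0 + 1) (v' - 1) true (by omega) (by omega) (by intro h; omega),
              ih fb v' (e0 - 1) true (by omega) (by omega) (by intro h; omega)]
          · rw [if_neg hv] at hAB
            cases hAB
        · rename_i hB
          rw [hlst] at hB
          have hAB : pvFindCut s s0 ((e0 - s0 + 1).toNat) e0 0 = none := by
            rw [hcut]; unfold pvLook; rw [hB]
          rw [hcutA] at hAB
          cases hAB
      · rename_i hcutA
        split
        · rename_i v' hB
          rw [hlst] at hB
          have hAB : pvFindCut s s0 ((e0 - s0 + 1).toNat) e0 0 = (if s0 ≤ v' then some (v' - 1) else none) := by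
            rw [hcut]; unfold pvLook; rw [hB]
          rw [hcutA] at hAB
          by_cases hv : s0 ≤ v'
          · rw [if_pos hv] at hAB
            cases hAB
          · rw [if_neg hv]
        · rfl

-- ===== VERDICT (by name: the statement is the Claim_ definition above) =====
theorem get_polytomy_substring_pos_spec : Claim_equal_get_polytomy_substring_pos := by
  intro start end_ arr thr s cbs _hdom hpre
  unfold Spec_get_polytomy_substring_pos get_polytomy_substring_pos_alt get_polytomy_substring_pos
  refine pvMain s arr thr ((end_ - start).toNat + 1) ((end_ - start).toNat + 1) start end_ cbs
    (by omega) (by omega) ?_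
  intro hlt
  rcases hpre with h | h
  · omega
  · exact h
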